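-- pv_equiv track=rewrite | github.com/ZYKDX/NEU-ALIGN | Lab7_6_to_squares.py | to_squares
-- ===== SOURCE A (Python) =====
-- def to_squares(my_list, my_index):
--     if my_list == []:
--         return my_list
--     if my_index == len(my_list) - 1 or my_index == -1:
--         my_list[my_index] = my_list[my_index] ** 2
--         return my_list
--     else:
--         temp = my_list[my_index] ** 2
--         my_list = to_squares(my_list, my_index + 1)
--         my_list[my_index] = temp
--         return my_list
-- ===== SOURCE B (Python) =====
-- def to_squares(my_list, my_index):
--     if not my_list:
--         return my_list
--     i = my_index
--     while True:
--         my_list[i] = my_list[i] * my_list[i]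
--         if i == len(my_list) - 1 or i == -1:
--             break
--         i += 1
--     return my_list
-- ===== Notes on version B (the rewrite author's own statement) =====
-- stated objective: simpler
-- what changed: A's backward recursion (recurse to the end, then assign each squared temp on the way back) is replaced by a plain forward while loop that squares each element in place and keeps only a running index.
import Mathlib
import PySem

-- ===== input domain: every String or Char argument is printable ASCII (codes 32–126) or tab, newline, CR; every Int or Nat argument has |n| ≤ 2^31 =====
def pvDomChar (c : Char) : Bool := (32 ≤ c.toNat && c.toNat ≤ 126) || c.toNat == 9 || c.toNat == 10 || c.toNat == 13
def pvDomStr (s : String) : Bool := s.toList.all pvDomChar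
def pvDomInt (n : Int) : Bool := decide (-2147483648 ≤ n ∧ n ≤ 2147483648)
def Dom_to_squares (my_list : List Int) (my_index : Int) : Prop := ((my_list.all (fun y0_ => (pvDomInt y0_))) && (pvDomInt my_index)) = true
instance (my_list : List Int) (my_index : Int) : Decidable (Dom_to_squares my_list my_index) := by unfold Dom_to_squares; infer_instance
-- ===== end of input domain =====

-- B replaces A's backward recursion (square after the recursive call returns) with a plain forward
-- while loop that squares in place and keeps only a running index (simpler); both A and B mutate the
-- list in place in Python, and the equivalence proved here is about the returned value.


-- ===== PORT A =====
-- literal transliteration of A's recursion, with an explicit fuel bounding the recursion depth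
-- (the fuel passed by to_squares always suffices, see a_char below); the `else []` arms are
-- never reached on admitted inputs: the last one is where Python raises IndexError
def aLoop (fuel : Nat) (my_list : List Int) (my_index : Int) : List Int :=
  match fuel with
  | 0 => []  -- unreachable: the initial fuel bounds the recursion depth
  | fuel + 1 =>
    if my_list = [] then my_list
    else if my_index = (my_list.length : Int) - 1 ∨ my_index = -1 then
      PySem.List.pySetD my_list my_index ((PySem.List.pyGetD my_list my_index 0) ^ 2)
    else if PySem.Raise.InRange my_list.length my_index then
      let temp := (PySem.List.pyGetD my_list my_index 0) ^ 2
      let l' := aLoop fuel my_list (my_index + 1)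
      PySem.List.pySetD l' my_index temp
    else []  -- IndexError

def to_squares (my_list : List Int) (my_index : Int) : List Int :=
  aLoop (my_list.length + 1 + (-my_index).toNat) my_list my_index

-- ===== PORT B =====
-- the while loop of B, as a recursive helper over the running index i, with an explicit fuel
-- bounding the number of iterations (the fuel passed by to_squares_alt always suffices, see b_char)
def altLoop (fuel : Nat) (my_list : List Int) (i : Int) : List Int :=
  match fuel with
  | 0 => []  -- unreachable: the initial fuel bounds the iteration count
  | fuel + 1 =>
    if PySem.Raise.InRange my_list.length i then
      let l' := PySem.List.pySetD my_list i
        ((PySem.List.pyGetD my_list i 0) * (PySem.List.pyGetD my_list i 0))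
      if i = (l'.length : Int) - 1 ∨ i = -1 then l'
      else altLoop fuel l' (i + 1)
    else []  -- IndexError

def to_squares_alt (my_list : List Int) (my_index : Int) : List Int :=
  if my_list = [] then my_list
  else altLoop (my_list.length + 1 + (-my_index).toNat) my_list my_index

-- ===== PRECONDITION & SPEC =====
-- Pre_ excludes exactly the inputs on which A raises IndexError (a non-empty list with an
-- out-of-range index): A returns normally everywhere else.
def Pre_to_squares (my_list : List Int) (my_index : Int) : Prop :=
  my_list = [] ∨ (-(my_list.length : Int) ≤ my_index ∧ my_index < my_list.length)
instance (my_list : List Int) (my_index : Int) : Decidable (Pre_to_squares my_list my_index) := by unfold Pre_to_squares; infer_instance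
def pvWitness_to_squares : List Int × Int := ([1, 2, 3], -2)

def Spec_to_squares (my_list : List Int) (my_index : Int) (out : List Int) : Prop := out = to_squares_alt my_list my_index
instance (my_list : List Int) (my_index : Int) (out : List Int) : Decidable (Spec_to_squares my_list my_index out) := by unfold Spec_to_squares; infer_instance

-- ===== CLAIM (what is proved, stated in full; the proofs are below) =====
def Claim_equal_to_squares : Prop := ∀ (my_list : List Int) (my_index : Int), Dom_to_squares my_list my_index → Pre_to_squares my_list my_index → Spec_to_squares my_list my_index (to_squares my_list my_index)

-- ===== LEMMAS AND PROOFS =====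

-- the squared tail, by normalized start position
def sqFrom (l : List Int) (j : Nat) : List Int :=
  l.take j ++ (l.drop j).map (fun v => v * v)

def normIdx (l : List Int) (i : Int) : Nat :=
  (if 0 ≤ i then i else i + l.length).toNat

lemma length_sqFrom (l : List Int) (j : Nat) : (sqFrom l j).length = l.length := by
  simp [sqFrom]; omega

lemma normIdx_lt (xs : List Int) (i : Int) (h1 : -(xs.length : Int) ≤ i) (h2 : i < xs.length) :
    normIdx xs i < xs.length := by
  unfold normIdx; split <;> omega

lemma pyIdx_inrange (n : Nat) (i : Int) (h1 : -(n : Int) ≤ i) (h2 : i < n) :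
    PySem.List.pyIdx? n i = some ((if 0 ≤ i then i else i + n).toNat) := by
  unfold PySem.List.pyIdx?
  by_cases h0 : 0 ≤ i
  · rw [if_pos h0, if_pos (by omega), if_pos h0]
  · rw [if_neg h0, if_pos (by omega), if_neg h0]
    congr 1
    omega

lemma pyGetD_inrange (xs : List Int) (i : Int) (d : Int)
    (h1 : -(xs.length : Int) ≤ i) (h2 : i < xs.length) :
    PySem.List.pyGetD xs i d = xs[normIdx xs i]'(normIdx_lt xs i h1 h2) := by
  have hlt := normIdx_lt xs i h1 h2
  have h : PySem.List.pyGet? xs i = some (xs[normIdx xs i]'hlt) := by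
    simp only [PySem.List.pyGet?, pyIdx_inrange xs.length i h1 h2]
    show xs[normIdx xs i]? = _
    exact List.getElem?_eq_getElem hlt
  simp [PySem.List.pyGetD, h]

lemma pySetD_inrange (xs : List Int) (i : Int) (v : Int)
    (h1 : -(xs.length : Int) ≤ i) (h2 : i < xs.length) :
    PySem.List.pySetD xs i v = xs.set (normIdx xs i) v := by
  simp only [PySem.List.pySetD, PySem.List.pySet?, pyIdx_inrange xs.length i h1 h2,
    Option.map_some, Option.getD_some]
  rfl

lemma sqFrom_length_eq (l : List Int) : sqFrom l l.length = l := by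
  simp [sqFrom]

lemma set_sqFrom (l : List Int) (j : Nat) (hj : j < l.length) :
    (sqFrom l (j + 1)).set j (l[j] * l[j]) = sqFrom l j := by
  have ht : l.take (j + 1) = l.take j ++ [l[j]] := by
    rw [List.take_add_one, List.getElem?_eq_getElem hj, Option.toList_some]
  have hd : l.drop j = l[j] :: l.drop (j + 1) := List.drop_eq_getElem_cons hj
  unfold sqFrom
  rw [List.set_append, if_pos (by simp; omega), ht, List.set_append,
    if_neg (by simp),
    show List.map (fun v => v * v) (List.drop j l)
        = l[j] * l[j] :: List.map (fun v => v * v) (List.drop (j + 1) l) from by rw [hd]; rfl]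
  simp [Nat.min_eq_left (Nat.le_of_lt hj)]

lemma set_last_sqFrom (l : List Int) (j : Nat) (hj : j + 1 = l.length) :
    l.set j (l[j]'(by omega) * l[j]'(by omega)) = sqFrom l j := by
  have := set_sqFrom l j (by omega)
  rw [show j + 1 = l.length from hj, sqFrom_length_eq] at this
  exact this

lemma sqFrom_set (l : List Int) (j : Nat) (v : Int) (hj : j < l.length) :
    sqFrom (l.set j v) (j + 1) = (sqFrom l (j + 1)).set j v := by
  unfold sqFrom
  rw [List.take_set, List.drop_set, if_pos (Nat.lt_succ_self j),
    List.set_append, if_pos (by simp; omega)]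

lemma a_char : ∀ (d : Nat) (l : List Int) (i : Int), l ≠ [] →
    -(l.length : Int) ≤ i → i < l.length →
    (if 0 ≤ i then (l.length : Int) + 1 - i else -i).toNat ≤ d →
    aLoop d l i = sqFrom l (normIdx l i) := by
  intro d
  induction d with
  | zero =>
    intro l i hne h1 h2 hm
    exfalso
    have : l.length ≠ 0 := by simpa using hne
    split_ifs at hm <;> omega
  | succ d ih =>
    intro l i hne h1 h2 hm
    have hlen : l.length ≠ 0 := by simpa using hne
    rw [aLoop, if_neg hne]
    by_cases hb : i = (l.length : Int) - 1 ∨ i = -1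
    · rw [if_pos hb]
      have hn : normIdx l i = l.length - 1 := by
        unfold normIdx; rcases hb with hb | hb <;> subst hb <;> split_ifs <;> omega
      rw [pyGetD_inrange l i 0 h1 h2, pySetD_inrange l i _ h1 h2, pow_two]
      exact set_last_sqFrom l (normIdx l i) (by omega)
    · rw [if_neg hb, if_pos (show PySem.Raise.InRange l.length i from ⟨h1, h2⟩)]
      rw [not_or] at hb
      have h2' : i + 1 < (l.length : Int) := by
        by_cases h0 : 0 ≤ i <;> omega
      have hrec := ih l (i + 1) hne (by omega) h2' (by split_ifs at hm ⊢ <;> omega)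
      have hn1 : normIdx l (i + 1) = normIdx l i + 1 := by
        unfold normIdx; split_ifs <;> omega
      rw [hrec, hn1, pyGetD_inrange l i 0 h1 h2,
        pySetD_inrange _ i _ (by rw [length_sqFrom]; omega) (by rw [length_sqFrom]; omega)]
      have hnorm_eq : normIdx (sqFrom l (normIdx l i + 1)) i = normIdx l i := by
        unfold normIdx; rw [length_sqFrom]
      rw [hnorm_eq, pow_two]
      exact set_sqFrom l (normIdx l i) (by unfold normIdx; split_ifs <;> omega)

lemma b_char : ∀ (d : Nat) (l : List Int) (i : Int),
    -(l.length : Int) ≤ i → i < l.length →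
    (if 0 ≤ i then (l.length : Int) + 1 - i else -i).toNat ≤ d →
    altLoop d l i = sqFrom l (normIdx l i) := by
  intro d
  induction d with
  | zero =>
    intro l i h1 h2 hm
    exfalso
    split_ifs at hm <;> omega
  | succ d ih =>
    intro l i h1 h2 hm
    rw [altLoop, if_pos (show PySem.Raise.InRange l.length i from ⟨h1, h2⟩)]
    simp only [pyGetD_inrange l i 0 h1 h2, pySetD_inrange l i _ h1 h2, List.length_set]
    have hjlt : normIdx l i < l.length := normIdx_lt l i h1 h2
    by_cases hb : i = (l.length : Int) - 1 ∨ i = -1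
    · rw [if_pos hb]
      exact set_last_sqFrom l (normIdx l i) (by unfold normIdx at *; split_ifs at * <;> omega)
    · rw [if_neg hb]
      rw [not_or] at hb
      have h2' : i + 1 < (l.length : Int) := by
        unfold normIdx at hjlt; by_cases h0 : 0 ≤ i <;> split_ifs at hjlt <;> omega
      have hrec := ih (l.set (normIdx l i) (l[normIdx l i] * l[normIdx l i])) (i + 1)
        (by simp; omega) (by simp; omega) (by simp; split_ifs at hm ⊢ <;> omega)
      have hn1 : normIdx (l.set (normIdx l i) (l[normIdx l i] * l[normIdx l i])) (i + 1)
          = normIdx l i + 1 := by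
        unfold normIdx; simp only [List.length_set]; split_ifs <;> omega
      rw [hrec, hn1, sqFrom_set l (normIdx l i) _ hjlt, set_sqFrom l (normIdx l i) hjlt]

lemma alt_char (l : List Int) (i : Int) (hne : l ≠ [])
    (h1 : -(l.length : Int) ≤ i) (h2 : i < l.length) :
    to_squares_alt l i = sqFrom l (normIdx l i) := by
  rw [to_squares_alt, if_neg hne]
  exact b_char (l.length + 1 + (-i).toNat) l i h1 h2 (by split_ifs <;> omega)

-- ===== VERDICT (by name: the statement is the Claim_ definition above) =====
theorem to_squares_spec : Claim_equal_to_squares := by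
  intro l i _ hpre
  unfold Spec_to_squares
  rcases hpre with h | ⟨h1, h2⟩
  · subst h
    rw [to_squares, to_squares_alt, if_pos rfl,
      show ([] : List Int).length + 1 + (-i).toNat = (-i).toNat + 1 from by simp; omega,
      aLoop]
    simp
  · have hne : l ≠ [] := by
      rintro rfl
      simp only [List.length_nil, Nat.cast_zero, neg_zero] at h1 h2
      omega
    rw [to_squares,
      a_char (l.length + 1 + (-i).toNat) l i hne h1 h2 (by split_ifs <;> omega),
      alt_char l i hne h1 h2]
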